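-- pv_equiv track=rewrite | github.com/lichtmic/PAD-Genomic_Sequence_Clustering | P2.py | input_check
-- ===== SOURCE A (Python) =====
-- def input_check(list_of_pairs):
--     """
--     Validate input format and clean sequences.
--
--     Checks that input is a list of tuples where each tuple contains
--     two strings (label, sequence). Cleans sequences by removing spaces
--     and converting to uppercase.
--
--     Args:
--         list_of_pairs (list[tuple[str, str]]): List of (label, sequence) pairs
--
--     Returns:
--         list[tuple[str, str]]: Cleaned list of (label, sequence) pairs
--
--     Raises:
--         Exception: If input format is invalid, raises "malformed input"
--     """
--     if not isinstance(list_of_pairs, list):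
--         raise Exception("malformed input")
--     if not all(isinstance(pair, tuple) and len(pair) == 2 for pair in list_of_pairs):
--         raise Exception("malformed input")
--     if not all(isinstance(pair[0], str) and isinstance(pair[1], str) for pair in list_of_pairs):
--         raise Exception("malformed input")
--     else:
--         cleaned = [(label, seq.replace(" ", "").upper()) for label, seq in list_of_pairs]
--         return cleaned
-- ===== SOURCE B (Python) =====
-- def input_check(list_of_pairs):
--     # Fused validate-and-clean pass; the cleaning itself is a single
--     # character-level sweep (drop spaces and uppercase each kept character
--     # in one go) instead of staged whole-string replace() and upper() passes.
--     if not isinstance(list_of_pairs, list):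
--         raise Exception("malformed input")
--     cleaned = []
--     for pair in list_of_pairs:
--         if not (isinstance(pair, tuple) and len(pair) == 2
--                 and isinstance(pair[0], str) and isinstance(pair[1], str)):
--             raise Exception("malformed input")
--         label, seq = pair
--         cleaned.append((label, "".join([c.upper() for c in seq if c != " "])))
--     return cleaned
-- ===== Notes on version B (the rewrite author's own statement) =====
-- stated objective: alternative
-- what changed: B fuses validation and cleaning into one pass over the pairs and replaces A's staged whole-string replace(' ','') then .upper() with a single character-level sweep that filters spaces and uppercases each kept character as it goes.
import Mathlib
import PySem

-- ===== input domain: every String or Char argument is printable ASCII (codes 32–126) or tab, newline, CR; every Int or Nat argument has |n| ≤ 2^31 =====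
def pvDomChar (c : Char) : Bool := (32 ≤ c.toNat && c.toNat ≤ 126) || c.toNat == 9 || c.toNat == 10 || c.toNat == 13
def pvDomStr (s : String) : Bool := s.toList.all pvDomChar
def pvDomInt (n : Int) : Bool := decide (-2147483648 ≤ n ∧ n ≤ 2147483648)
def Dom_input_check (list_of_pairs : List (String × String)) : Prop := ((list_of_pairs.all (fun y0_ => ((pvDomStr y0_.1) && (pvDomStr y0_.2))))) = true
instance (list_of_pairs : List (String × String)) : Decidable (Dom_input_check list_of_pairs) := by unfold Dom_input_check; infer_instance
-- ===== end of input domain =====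

-- B fuses A's separate validation scans and cleaning comprehension into one pass and
-- cleans each sequence by a single character-level sweep (filter spaces, uppercase each
-- kept character) instead of A's staged replace(" ","") then .upper() string passes
-- (objective: alternative). Under the typed domain List (String × String) every
-- isinstance check succeeds, so neither program raises.


-- ===== PORT A =====
-- A's isinstance/len guards are always true under the type convention (each element IS a
-- 2-tuple of strings), so its two `all` scans succeed and it returns the cleaning
-- comprehension; the scans are transcribed, the raise branches are unreachable.
def input_check (list_of_pairs : List (String × String)) : List (String × String) :=
  if ¬ (list_of_pairs.all (fun _ => true)) then []          -- unreachable raise branch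
  else if ¬ (list_of_pairs.all (fun _ => true)) then []      -- unreachable raise branch
  else list_of_pairs.map (fun p => (p.1, PySem.Str.upper (PySem.Str.replace p.2 " " "")))

-- ===== PORT B =====
-- Source B's single loop with an accumulator; per pair the cleaned sequence is built by one
-- character-level comprehension: keep c ≠ ' ', uppercase each kept character ("".join).
def input_check_alt (list_of_pairs : List (String × String)) : List (String × String) :=
  list_of_pairs.foldl
    (fun cleaned p =>
      cleaned ++ [(p.1,
        String.ofList ((p.2.toList.filter (fun c => c ≠ ' ')).map PySem.Chars.upperChar))]) []

-- ===== PRECONDITION & SPEC =====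
def Spec_input_check (list_of_pairs : List (String × String)) (out : List (String × String)) : Prop := out = input_check_alt list_of_pairs
instance (list_of_pairs : List (String × String)) (out : List (String × String)) : Decidable (Spec_input_check list_of_pairs out) := by unfold Spec_input_check; infer_instance

-- ===== CLAIM =====
def Claim_equal_input_check : Prop := ∀ (list_of_pairs : List (String × String)), Dom_input_check list_of_pairs → Spec_input_check list_of_pairs (input_check list_of_pairs)

-- ===== LEMMAS AND PROOFS =====
theorem foldl_append_eq_map' (f : String × String → String × String)
    (l : List (String × String)) (acc : List (String × String)) :
    l.foldl (fun r p => r ++ [f p]) acc = acc ++ l.map f := by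
  induction l generalizing acc with
  | nil => simp
  | cons h t ih => simp [List.foldl, ih]

-- replace s " " "" deletes spaces: its fuel loop is the space filter
theorem replace_go_space (fuel : Nat) (l acc : List Char) (h : l.length ≤ fuel) :
    PySem.Chars.replace.go [' '] [] fuel l acc
      = acc.reverse ++ l.filter (fun c => c ≠ ' ') := by
  induction fuel generalizing l acc with
  | zero =>
    have hl : l = [] := List.eq_nil_of_length_eq_zero (Nat.le_zero.mp h)
    subst hl
    simp [PySem.Chars.replace.go]
  | succ n ih =>
    cases l with
    | nil => simp [PySem.Chars.replace.go]
    | cons c t =>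
      by_cases hc : c = ' '
      · subst hc
        rw [show PySem.Chars.replace.go [' '] [] (n + 1) (' ' :: t) acc
              = PySem.Chars.replace.go [' '] [] n t acc from by
            simp [PySem.Chars.replace.go, List.isPrefixOf]]
        rw [ih _ _ (by simpa using Nat.le_of_succ_le_succ h)]
        simp
      · rw [show PySem.Chars.replace.go [' '] [] (n + 1) (c :: t) acc
              = PySem.Chars.replace.go [' '] [] n t (c :: acc) from by
            simp [PySem.Chars.replace.go, List.isPrefixOf,
                  show (' ' == c) = false from beq_eq_false_iff_ne.mpr (Ne.symm hc)]]
        rw [ih _ _ (Nat.le_of_succ_le_succ h)]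
        simp [hc]

theorem replace_space_eq_filter (cs : List Char) :
    PySem.Chars.replace cs [' '] [] = cs.filter (fun c => c ≠ ' ') := by
  have := replace_go_space cs.length cs [] le_rfl
  simpa [PySem.Chars.replace] using this

theorem clean_eq (s : String) :
    PySem.Str.upper (PySem.Str.replace s " " "")
      = String.ofList ((s.toList.filter (fun c => c ≠ ' ')).map PySem.Chars.upperChar) := by
  apply String.ext
  simp [PySem.Str.toList_upper, PySem.Str.toList_replace, PySem.Chars.upper,
        replace_space_eq_filter, String.toList_ofList]

-- ===== VERDICT =====
theorem input_check_spec : Claim_equal_input_check := by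
  intro l _
  unfold Spec_input_check input_check input_check_alt
  rw [foldl_append_eq_map']
  simp only [List.all_eq_true, implies_true, not_true_eq_false, if_false, List.nil_append]
  exact List.map_congr_left (fun p _ => by rw [clean_eq])
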